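-- pv_equiv track=rewrite | github.com/EddyGuo/pytest | search_func.py | address_searcher
-- ===== SOURCE A (Python) =====
-- def address_searcher(argv):
--     """选择搜索引擎"""
--     # 默认使用百度
--     search_address = 'https://www.baidu.com/baidu?wd='
--     for val in argv:
--         if val == '--google':
--             search_address = 'https://www.google.com/search?q='
--         elif val == '--baidu':
--             search_address =  'https://www.baidu.com/baidu?wd='
--         elif val == '--bing':
--             search_address = 'https://cn.bing.com/search?q='
--     return search_address
-- ===== SOURCE B (Python) =====
-- _ENGINES = {
--     '--google': 'https://www.google.com/search?q=',
--     '--baidu': 'https://www.baidu.com/baidu?wd=',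
--     '--bing': 'https://cn.bing.com/search?q=',
-- }
--
-- def address_searcher(argv):
--     """选择搜索引擎"""
--     for val in reversed(argv):
--         if val in _ENGINES:
--             return _ENGINES[val]
--     return 'https://www.baidu.com/baidu?wd='
-- ===== Notes on version B (the rewrite author's own statement) =====
-- stated objective: idiomatic
-- what changed: Replaces the forward last-wins overwrite loop with a flag-to-URL dict and a reverse scan that early-returns on the first (i.e. last in argv) recognised flag, defaulting to the baidu URL.
import Mathlib
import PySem

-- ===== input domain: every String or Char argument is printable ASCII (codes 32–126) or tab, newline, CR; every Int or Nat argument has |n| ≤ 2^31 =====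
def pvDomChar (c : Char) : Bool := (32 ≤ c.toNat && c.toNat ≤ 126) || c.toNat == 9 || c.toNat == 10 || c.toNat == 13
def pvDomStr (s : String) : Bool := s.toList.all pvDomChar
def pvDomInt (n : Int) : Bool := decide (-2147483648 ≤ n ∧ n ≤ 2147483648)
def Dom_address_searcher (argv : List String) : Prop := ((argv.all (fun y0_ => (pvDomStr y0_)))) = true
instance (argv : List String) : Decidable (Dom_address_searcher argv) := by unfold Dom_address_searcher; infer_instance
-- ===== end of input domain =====

-- B is the same task written idiomatically: a flag→URL dict plus a reverse scan with early return,
-- instead of A's forward last-wins overwrite loop. Return values proved equal on all inputs.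

-- ===== PORT A =====
-- forward loop, state overwritten on each recognised flag (last wins)
def address_searcher (argv : List String) : String :=
  argv.foldl
    (fun search_address val =>
      if val = "--google" then "https://www.google.com/search?q="
      else if val = "--baidu" then "https://www.baidu.com/baidu?wd="
      else if val = "--bing" then "https://cn.bing.com/search?q="
      else search_address)
    "https://www.baidu.com/baidu?wd="

-- ===== PORT B =====
-- the flag→URL table (Source B's _ENGINES dict)
def pvEngines : PySem.Dict String String :=
  PySem.Dict.mk
    [("--google", "https://www.google.com/search?q="),
     ("--baidu", "https://www.baidu.com/baidu?wd="),
     ("--bing", "https://cn.bing.com/search?q=")]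

-- 'for val in reversed(argv): if val in dict: return dict[val]' as recursion on the reversed list
def pvScanRev : List String → String
  | [] => "https://www.baidu.com/baidu?wd="
  | val :: rest =>
    match PySem.Dict.get? pvEngines val with
    | some u => u
    | none => pvScanRev rest

def address_searcher_alt (argv : List String) : String :=
  pvScanRev argv.reverse

-- ===== PRECONDITION & SPEC =====
def Spec_address_searcher (argv : List String) (out : String) : Prop := out = address_searcher_alt argv
instance (argv : List String) (out : String) : Decidable (Spec_address_searcher argv out) := by unfold Spec_address_searcher; infer_instance

-- ===== CLAIM (what is proved, stated in full; the proofs are below) =====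
def Claim_equal_address_searcher : Prop := ∀ (argv : List String), Dom_address_searcher argv → Spec_address_searcher argv (address_searcher argv)

-- ===== LEMMAS AND PROOFS =====

-- pvScanRev generalised over the fallback value
def pvScanRevAux (l : List String) (s : String) : String :=
  match l with
  | [] => s
  | val :: rest =>
    match PySem.Dict.get? pvEngines val with
    | some u => u
    | none => pvScanRevAux rest s

theorem pvScanRev_eq_aux (l : List String) :
    pvScanRev l = pvScanRevAux l "https://www.baidu.com/baidu?wd=" := by
  induction l with
  | nil => rfl
  | cons v r ih => simp [pvScanRev, pvScanRevAux, ih]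

-- A's step function
def pvStepA (s val : String) : String :=
  if val = "--google" then "https://www.google.com/search?q="
  else if val = "--baidu" then "https://www.baidu.com/baidu?wd="
  else if val = "--bing" then "https://cn.bing.com/search?q="
  else s

theorem pvAux_snoc (r : List String) (v s : String) :
    pvScanRevAux (r ++ [v]) s = pvScanRevAux r (pvStepA s v) := by
  induction r with
  | nil =>
    by_cases hg : v = "--google"
    · subst hg; rfl
    · by_cases hb : v = "--baidu"
      · subst hb; rfl
      · by_cases hn : v = "--bing"
        · subst hn; rfl
        · simp [pvScanRevAux, pvStepA, hg, hb, hn, pvEngines,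
            PySem.Dict.get?, show ("--google" == v) = false by simp [Ne.symm hg],
            show ("--baidu" == v) = false by simp [Ne.symm hb],
            show ("--bing" == v) = false by simp [Ne.symm hn]]
  | cons w r ih =>
    simp only [List.cons_append, pvScanRevAux]
    rw [ih]

theorem pvFoldl_eq_aux (l : List String) (s : String) :
    l.foldl pvStepA s = pvScanRevAux l.reverse s := by
  induction l generalizing s with
  | nil => rfl
  | cons v r ih =>
    simp only [List.foldl_cons, List.reverse_cons]
    rw [ih, pvAux_snoc]

-- ===== VERDICT (by name: the statement is the Claim_ definition above) =====
theorem address_searcher_spec : Claim_equal_address_searcher := by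
  intro argv _
  show address_searcher argv = address_searcher_alt argv
  unfold address_searcher address_searcher_alt
  rw [pvScanRev_eq_aux]
  exact pvFoldl_eq_aux argv _
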